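-- pv_equiv track=rewrite | github.com/uber-research/go-explore | policy_based/goexplore_py/montezuma_env.py | is_pixel_death
-- ===== SOURCE A (Python) =====
-- def is_pixel_death(face_pixels, transition_screen):
--     # There are no face pixels and yet we are not in a transition screen. We
--     # must be dead!
--     if len(face_pixels) == 0:
--         # All of the screen except the bottom is black: this is not a death but a
--         # room transition. Ignore.
--         if transition_screen:
--             return False
--         return True
--
--     # We already checked for the presence of no face pixels, however,
--     # sometimes we can die and still have face pixels. In those cases,
--     # the face pixels will be DISCONNECTED.
--     for pixel in face_pixels:
--         for neighbor in [(-1, 0), (1, 0), (0, -1), (0, 1)]: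
--             if (pixel[0] + neighbor[0], pixel[1] + neighbor[1]) in face_pixels:
--                 return False
--
--     return True
-- ===== SOURCE B (Python) =====
-- def is_pixel_death(face_pixels, transition_screen):
--     if not face_pixels:
--         return not transition_screen
--     # Index the pixels by their first coordinate: rows[x] = set of second coords.
--     rows = {}
--     for x, y in face_pixels:
--         rows.setdefault(x, set()).add(y)
--     # Adjacency is symmetric, so it suffices to look "up" within a row and
--     # "right" into the next row; the dict index replaces the list scans.
--     for x, ys in rows.items():
--         nxt = rows.get(x + 1, set())
--         if any(y + 1 in ys or y in nxt for y in ys):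
--             return False
--     return True
-- ===== Notes on version B (the rewrite author's own statement) =====
-- stated objective: faster
-- what changed: Replaces the quadratic per-pixel 4-neighbor probe of the list with a dict index rows[x] -> set of y; by symmetry only the (0,+1) and (+1,0) offsets are checked, each by hash lookup.
import Mathlib
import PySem

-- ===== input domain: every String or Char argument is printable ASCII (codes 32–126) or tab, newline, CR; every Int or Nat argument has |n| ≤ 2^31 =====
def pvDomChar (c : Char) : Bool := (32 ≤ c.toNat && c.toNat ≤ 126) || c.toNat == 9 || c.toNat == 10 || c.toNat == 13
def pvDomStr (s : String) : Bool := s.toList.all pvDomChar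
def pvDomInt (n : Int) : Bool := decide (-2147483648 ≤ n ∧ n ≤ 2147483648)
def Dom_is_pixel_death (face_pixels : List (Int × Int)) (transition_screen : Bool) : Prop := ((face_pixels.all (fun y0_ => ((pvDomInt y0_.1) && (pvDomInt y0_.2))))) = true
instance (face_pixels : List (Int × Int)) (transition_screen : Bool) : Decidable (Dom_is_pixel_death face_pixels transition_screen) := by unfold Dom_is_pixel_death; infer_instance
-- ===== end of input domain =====

-- B replaces A's per-pixel 4-neighbor list probes with a dict index rows[x] -> set of y,
-- checking only the (0,+1) / (+1,0) offsets (adjacency is symmetric); objective: faster.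

-- ===== PORT A =====
-- nested for-loops with early `return False` ⇒ nested List.any; `in face_pixels` ⇒ list membership
def is_pixel_death (face_pixels : List (Int × Int)) (transition_screen : Bool) : Bool :=
  if face_pixels.length == 0 then
    if transition_screen then false else true
  else
    if face_pixels.any (fun pixel =>
        [((-1 : Int), (0 : Int)), (1, 0), (0, -1), (0, 1)].any (fun neighbor =>
          face_pixels.contains (pixel.1 + neighbor.1, pixel.2 + neighbor.2)))
    then false else true

-- ===== PORT B =====
-- rows.setdefault(x, set()).add(y)  ⇒  d[x] = d.get(x, set()).add(y)  ⇒  Dict.modify x [] (Set.add · y)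
def is_pixel_death_alt (face_pixels : List (Int × Int)) (transition_screen : Bool) : Bool :=
  if face_pixels.isEmpty then !transition_screen
  else
    let rows : PySem.Dict Int (PySem.Set Int) :=
      face_pixels.foldl (fun d p => d.modify p.1 [] (fun ys => PySem.Set.add ys p.2)) PySem.Dict.empty
    if rows.items.any (fun row =>
        let nxt : PySem.Set Int := rows.getD (row.1 + 1) PySem.Set.empty
        row.2.any (fun y => row.2.contains (y + 1) || nxt.contains y))
    then false else true

-- ===== PRECONDITION & SPEC =====
def Spec_is_pixel_death (face_pixels : List (Int × Int)) (transition_screen : Bool) (out : Bool) : Prop := out = is_pixel_death_alt face_pixels transition_screen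
instance (face_pixels : List (Int × Int)) (transition_screen : Bool) (out : Bool) : Decidable (Spec_is_pixel_death face_pixels transition_screen out) := by unfold Spec_is_pixel_death; infer_instance

-- ===== CLAIM (what is proved, stated in full; the proofs are below) =====
def Claim_equal_is_pixel_death : Prop := ∀ (face_pixels : List (Int × Int)) (transition_screen : Bool), Dom_is_pixel_death face_pixels transition_screen → Spec_is_pixel_death face_pixels transition_screen (is_pixel_death face_pixels transition_screen)

-- ===== LEMMAS AND PROOFS =====

-- the row-building fold, abbreviated for the lemmas
def pvRows (fp : List (Int × Int)) : PySem.Dict Int (PySem.Set Int) :=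
  fp.foldl (fun d p => d.modify p.1 [] (fun ys => PySem.Set.add ys p.2)) PySem.Dict.empty

theorem pv_mem_rows_getD (l : List (Int × Int)) (d : PySem.Dict Int (PySem.Set Int)) (x y : Int) :
    y ∈ (l.foldl (fun d p => d.modify p.1 [] (fun ys => PySem.Set.add ys p.2)) d).getD x []
      ↔ y ∈ d.getD x [] ∨ (x, y) ∈ l := by
  induction l generalizing d with
  | nil => simp
  | cons p t ih =>
    simp only [List.foldl_cons, ih, List.mem_cons, PySem.Dict.getD_modify]
    by_cases hx : x = p.1
    · subst hx
      simp only [if_pos trivial, PySem.Set.mem_add, Prod.ext_iff]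
      tauto
    · simp only [if_neg hx, Prod.ext_iff]
      tauto

theorem pv_rows_nodup (fp : List (Int × Int)) : (pvRows fp).keys.Nodup := by
  exact PySem.Dict.nodup_keys_foldl_modify_key fp (fun p => p.1) [] (fun _ p ys => PySem.Set.add ys p.2) PySem.Dict.empty PySem.Dict.nodup_keys_empty

theorem pv_rows_keys (fp : List (Int × Int)) (x : Int) :
    x ∈ (pvRows fp).keys ↔ ∃ y, (x, y) ∈ fp := by
  unfold pvRows
  rw [PySem.Dict.keys_foldl_modify_key]
  constructor
  · intro h
    have : x ∈ fp.map (fun p => p.1) := by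
      have := PySem.Set.mem_update _ _ _ |>.mp h
      simpa [PySem.Dict.keys_empty] using this
    obtain ⟨p, hp, rfl⟩ := List.mem_map.mp this
    exact ⟨p.2, hp⟩
  · rintro ⟨y, hy⟩
    exact (PySem.Set.mem_update _ _ _).mpr (Or.inr (List.mem_map.mpr ⟨(x, y), hy, rfl⟩))

-- B's scan finds a hit iff some pixel has its (0,+1) or (+1,0) neighbor among the pixels
theorem pv_alt_any (fp : List (Int × Int)) :
    ((pvRows fp).items.any (fun row =>
        row.2.any (fun y => row.2.contains (y + 1) || ((pvRows fp).getD (row.1 + 1) PySem.Set.empty).contains y)))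
      = true
    ↔ ∃ x y, (x, y) ∈ fp ∧ ((x, y + 1) ∈ fp ∨ (x + 1, y) ∈ fp) := by
  have hmem : ∀ x y, y ∈ (pvRows fp).getD x [] ↔ (x, y) ∈ fp := by
    intro x y
    unfold pvRows
    rw [pv_mem_rows_getD]
    simp [PySem.Dict.getD_empty]
  constructor
  · intro h
    simp only [List.any_eq_true] at h
    obtain ⟨row, hrow, y, hy, hc⟩ := h
    have hys : row.2 = (pvRows fp).getD row.1 [] :=
      (PySem.Dict.getD_of_mem_items _ hrow (pv_rows_nodup fp) []).symm
    refine ⟨row.1, y, ?_, ?_⟩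
    · exact (hmem row.1 y).mp (hys ▸ hy)
    · rcases Bool.or_eq_true_iff.mp hc with hc | hc
      · exact Or.inl ((hmem row.1 (y + 1)).mp (hys ▸ (by simpa using hc)))
      · exact Or.inr ((hmem (row.1 + 1) y).mp (by simpa [PySem.Set.empty] using hc))
  · rintro ⟨x, y, hxy, hnb⟩
    simp only [List.any_eq_true]
    have hx : x ∈ (pvRows fp).keys := (pv_rows_keys fp x).mpr ⟨y, hxy⟩
    have hcont : (pvRows fp).contains x = true := (PySem.Dict.contains_iff_mem_keys _ _).mpr hx
    have hsome : ((pvRows fp).get? x).isSome := by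
      rw [← PySem.Dict.contains_eq_isSome_get?]; exact hcont
    obtain ⟨ys, hget⟩ := Option.isSome_iff_exists.mp hsome
    have hitems : (x, ys) ∈ (pvRows fp).items := PySem.Dict.mem_items_of_get?_eq_some _ hget
    have hys : ys = (pvRows fp).getD x [] := by
      simp [PySem.Dict.getD_eq_get?_getD, hget]
    refine ⟨(x, ys), hitems, y, ?_, ?_⟩
    · exact hys ▸ (hmem x y).mpr hxy
    · rcases hnb with hnb | hnb
      · exact Bool.or_eq_true_iff.mpr (Or.inl (by simpa using hys ▸ (hmem x (y + 1)).mpr hnb))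
      · exact Bool.or_eq_true_iff.mpr (Or.inr (by simpa [PySem.Set.empty] using (hmem (x + 1) y).mpr hnb))

-- A's scan finds a hit iff the same condition holds (symmetry folds the 4 offsets into 2)
theorem pv_a_any (fp : List (Int × Int)) :
    (fp.any (fun pixel =>
        [((-1 : Int), (0 : Int)), (1, 0), (0, -1), (0, 1)].any (fun neighbor =>
          fp.contains (pixel.1 + neighbor.1, pixel.2 + neighbor.2))))
      = true
    ↔ ∃ x y, (x, y) ∈ fp ∧ ((x, y + 1) ∈ fp ∨ (x + 1, y) ∈ fp) := by
  simp only [List.any_eq_true, List.any_cons, List.any_nil, Bool.or_eq_true, List.contains_eq_mem,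
    decide_eq_true_eq, Bool.or_false]
  constructor
  · rintro ⟨⟨px, py⟩, hp, h⟩
    rcases h with h | h | h | h
    · exact ⟨px - 1, py, by simpa using h, Or.inr (by simpa using hp)⟩
    · exact ⟨px, py, hp, Or.inr (by simpa using h)⟩
    · exact ⟨px, py - 1, by simpa using h, Or.inl (by simpa using hp)⟩
    · exact ⟨px, py, hp, Or.inl (by simpa using h)⟩
  · rintro ⟨x, y, hxy, h | h⟩
    · exact ⟨(x, y), hxy, Or.inr (Or.inr (Or.inr (by simpa using h)))⟩
    · exact ⟨(x, y), hxy, Or.inr (Or.inl (by simpa using h))⟩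

-- ===== VERDICT (by name: the statement is the Claim_ definition above) =====
theorem is_pixel_death_spec : Claim_equal_is_pixel_death := by
  intro fp ts _
  unfold Spec_is_pixel_death is_pixel_death is_pixel_death_alt
  by_cases hfp : fp = []
  · subst hfp; cases ts <;> rfl
  · have hrows : (fp.foldl (fun d p => d.modify p.1 [] (fun ys => PySem.Set.add ys p.2)) PySem.Dict.empty) = pvRows fp := rfl
    simp only [hrows]
    simp [hfp]
    rw [Bool.eq_iff_iff]
    simpa using (pv_a_any fp).trans (pv_alt_any fp).symm
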